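-- pv_equiv track=rewrite | github.com/tekulvw/Squid-Plugins | bankvampire/bankvampire.py | reduce_fucked
-- ===== SOURCE A (Python) =====
-- def reduce_fucked(fucked):
--     is_global = True
--     mid = {}
--     for gid, user, loss in fucked:
--         if gid is not None:
--             is_global = False
--         if (gid, user) not in mid:
--             mid[(gid, user)] = 0
--         mid[(gid, user)] += loss
--
--     if is_global:
--         ret = [(gid, user, loss) for (gid, user), loss in mid.items()]
--         return sorted(ret, key=lambda x: x[2], reverse=True)
--     else:
--         mid2 = {}
--         for (gid, user), loss in mid.items():
--             if gid not in mid2: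
--                 mid2[gid] = []
--             mid2[gid].append((user, loss))
--
--         for gid in mid2.keys():
--             mid2[gid] = sorted(mid2[gid], key=lambda x: x[1], reverse=True)
--         return [
--             (gid, user, loss)
--             for gid, userloss_list in mid2.items()
--             for user, loss in userloss_list
--         ]
-- ===== SOURCE B (Python) =====
-- def reduce_fucked(fucked):
--     # One flat aggregation pass, then group-by-filter over first-appearance gids;
--     # no is_global flag and no nested dict-of-lists: the all-None case collapses
--     # to a single group, which is exactly the global sort.
--     totals = {}
--     for gid, user, loss in fucked:
--         totals[(gid, user)] = totals.get((gid, user), 0) + loss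
--     seen = list(dict.fromkeys(g for (g, _u) in totals))
--     out = []
--     for g in seen:
--         group = [(u, l) for (gg, u), l in totals.items() if gg == g]
--         group = sorted(group, key=lambda ul: ul[1], reverse=True)
--         out.extend((g, u, l) for u, l in group)
--     return out
-- ===== Notes on version B (the rewrite author's own statement) =====
-- stated objective: simpler
-- what changed: Replaced A's is_global flag, two-way branch and nested dict-of-lists regrouping by one flat aggregation dict followed by a group-by-filter over first-appearance gids (the all-None case collapses to a single group, so no branch is needed).
import Mathlib
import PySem

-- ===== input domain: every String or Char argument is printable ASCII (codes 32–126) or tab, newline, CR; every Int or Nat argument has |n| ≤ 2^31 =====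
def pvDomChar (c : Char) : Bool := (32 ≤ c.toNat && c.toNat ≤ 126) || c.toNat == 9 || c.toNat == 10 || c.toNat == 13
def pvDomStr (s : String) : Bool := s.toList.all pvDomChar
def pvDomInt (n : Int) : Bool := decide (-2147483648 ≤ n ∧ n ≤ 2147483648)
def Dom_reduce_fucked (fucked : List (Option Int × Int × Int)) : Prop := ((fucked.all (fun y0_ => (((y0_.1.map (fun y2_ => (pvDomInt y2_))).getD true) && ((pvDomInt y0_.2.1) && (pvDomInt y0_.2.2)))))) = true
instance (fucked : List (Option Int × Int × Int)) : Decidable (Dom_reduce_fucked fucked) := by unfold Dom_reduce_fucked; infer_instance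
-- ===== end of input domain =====

-- B replaces A's is_global flag, branch and nested dict-of-lists by a single flat
-- aggregation followed by group-by-filter over first-appearance gids (objective: simpler).

-- ===== PORT A =====
def reduce_fucked (fucked : List (Option Int × Int × Int)) : List (Option Int × Int × Int) :=
  let st := fucked.foldl (fun (st : Bool × PySem.Dict (Option Int × Int) Int) t =>
      let gid := t.1; let user := t.2.1; let loss := t.2.2
      -- if gid is not None: is_global = False
      let isg := if gid ≠ none then false else st.1
      -- if (gid, user) not in mid: mid[(gid, user)] = 0
      let mid := if st.2.contains (gid, user) = false then st.2.insert (gid, user) 0 else st.2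
      -- mid[(gid, user)] += loss
      (isg, mid.modify (gid, user) 0 (· + loss))) (true, PySem.Dict.empty)
  if st.1 then
    PySem.List.sorted (st.2.items.map (fun p => (p.1.1, p.1.2, p.2))) (fun x => x.2.2) true
  else
    let mid2 := st.2.items.foldl (fun (d : PySem.Dict (Option Int) (List (Int × Int))) p =>
      let d := if d.contains p.1.1 = false then d.insert p.1.1 [] else d
      -- mid2[gid].append((user, loss))
      d.modify p.1.1 [] (fun l => l ++ [(p.1.2, p.2)])) PySem.Dict.empty
    -- for gid in mid2.keys(): mid2[gid] = sorted(mid2[gid], key=lambda x: x[1], reverse=True)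
    let mid2s := mid2.keys.foldl (fun (d : PySem.Dict (Option Int) (List (Int × Int))) g =>
      d.insert g (PySem.List.sorted (d.getD g []) (fun x => x.2) true)) mid2
    mid2s.items.flatMap (fun gp => gp.2.map (fun ul => (gp.1, ul.1, ul.2)))

-- ===== PORT B =====
def reduce_fucked_alt (fucked : List (Option Int × Int × Int)) : List (Option Int × Int × Int) :=
  let totals := fucked.foldl (fun (d : PySem.Dict (Option Int × Int) Int) t =>
      d.insert (t.1, t.2.1) (d.getD (t.1, t.2.1) 0 + t.2.2)) PySem.Dict.empty
  let seen := PySem.List.dedup (totals.items.map (fun p => p.1.1))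
  seen.flatMap (fun g =>
    (PySem.List.sorted ((totals.items.filter (fun p => p.1.1 == g)).map (fun p => (p.1.2, p.2)))
        (fun ul => ul.2) true).map (fun ul => (g, ul.1, ul.2)))

-- ===== PRECONDITION & SPEC =====
def Spec_reduce_fucked (fucked : List (Option Int × Int × Int)) (out : List (Option Int × Int × Int)) : Prop := out = reduce_fucked_alt fucked
instance (fucked : List (Option Int × Int × Int)) (out : List (Option Int × Int × Int)) : Decidable (Spec_reduce_fucked fucked out) := by unfold Spec_reduce_fucked; infer_instance

-- ===== CLAIM (what is proved, stated in full; the proofs are below) =====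
def Claim_equal_reduce_fucked : Prop := ∀ (fucked : List (Option Int × Int × Int)), Dom_reduce_fucked fucked → Spec_reduce_fucked fucked (reduce_fucked fucked)

-- ===== LEMMAS AND PROOFS =====

-- insert-if-absent followed by modify at the same key is just modify
theorem modify_of_insert_if_absent {κ ν : Type} [BEq κ] [LawfulBEq κ] (d : PySem.Dict κ ν)
    (k : κ) (v0 : ν) (f : ν → ν) :
    (if d.contains k = false then d.insert k v0 else d).modify k v0 f = d.modify k v0 f := by
  by_cases h : d.contains k = false
  · simp only [h, if_pos, PySem.Dict.modify, PySem.Dict.getD_insert_self,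
      PySem.Dict.insert_insert_self]
    rw [PySem.Dict.getD_of_not_contains d v0 h]
  · simp [h]

-- A's flat-aggregation fold equals B's, and the flag is "all gids are None"
theorem foldA_eq (l : List (Option Int × Int × Int)) (b : Bool) (d : PySem.Dict (Option Int × Int) Int) :
    l.foldl (fun (st : Bool × PySem.Dict (Option Int × Int) Int) t =>
      let gid := t.1; let user := t.2.1; let loss := t.2.2
      let isg := if gid ≠ none then false else st.1
      let mid := if st.2.contains (gid, user) = false then st.2.insert (gid, user) 0 else st.2
      (isg, mid.modify (gid, user) 0 (· + loss))) (b, d)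
    = (b && l.all (fun t => t.1 == none),
       l.foldl (fun d t => d.insert (t.1, t.2.1) (d.getD (t.1, t.2.1) 0 + t.2.2)) d) := by
  induction l generalizing b d with
  | nil => simp
  | cons t l ih =>
    simp only [List.foldl_cons, List.all_cons]
    rw [ih]
    congr 1
    · cases h : t.1 <;> simp
    · rw [modify_of_insert_if_absent]
      simp [PySem.Dict.modify]

-- a stable insert into a mapped list is the map of a stable insert
theorem insertBy_map {α β : Type} (f : α → β) (p : β → β → Bool) (x : α) (acc : List α) :
    PySem.List.insertBy p (f x) (acc.map f) =
    (PySem.List.insertBy (fun a b => p (f a) (f b)) x acc).map f := by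
  induction acc with
  | nil => simp [PySem.List.insertBy]
  | cons y ys ih =>
    simp only [List.map_cons, PySem.List.insertBy]
    by_cases h : p (f x) (f y) <;> simp [h, ih]

-- sorting a mapped list = mapping the list sorted by the composed key (stability)
theorem sorted_rev_map {α β κ : Type} [LT κ] [DecidableLT κ] (f : α → β) (key : β → κ) (l : List α) :
    PySem.List.sorted (l.map f) key true = (PySem.List.sorted l (fun x => key (f x)) true).map f := by
  rw [PySem.List.sorted_rev_eq_foldl_insertBy, PySem.List.sorted_rev_eq_foldl_insertBy]
  rw [List.foldl_map]
  have gen : ∀ (acc : List α),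
      List.foldl (fun acc x => PySem.List.insertBy (fun a b => decide (key b < key a)) (f x) acc) (acc.map f) l
      = (List.foldl (fun acc x => PySem.List.insertBy (fun a b => decide (key (f b) < key (f a))) x acc) acc l).map f := by
    induction l with
    | nil => intro acc; rfl
    | cons x xs ih =>
      intro acc
      simp only [List.foldl_cons]
      rw [insertBy_map f (fun a b => decide (key b < key a)) x acc, ih]
  simpa using gen []

-- dedup of a nonempty constant list is the singleton
theorem dedup_const {α : Type} [BEq α] [LawfulBEq α] (l : List α) (a : α) (h : ∀ x ∈ l, x = a)
    (hne : l ≠ []) : PySem.List.dedup l = [a] := by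
  have step : ∀ (m : List α), (∀ x ∈ m, x = a) → List.foldl PySem.Set.add [a] m = [a] := by
    intro m hm
    induction m with
    | nil => rfl
    | cons y ys ih =>
      have : y = a := hm y (by simp)
      subst this
      simp only [List.foldl_cons, PySem.Set.add]
      simp
      exact ih (fun x hx => hm x (by simp [hx]))
  cases l with
  | nil => exact absurd rfl hne
  | cons y ys =>
    have : y = a := h y (by simp)
    subst this
    simp only [PySem.List.dedup, PySem.Set.ofList, List.foldl_cons]
    have : PySem.Set.add PySem.Set.empty y = [y] := by simp [PySem.Set.add, PySem.Set.empty]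
    rw [this]
    exact step ys (fun x hx => h x (by simp [hx]))

-- Set.update adds nothing when every element is already present
theorem set_update_of_subset {κ : Type} [BEq κ] [LawfulBEq κ] (s : List κ) (ks : List κ)
    (h : ∀ k ∈ ks, k ∈ s) : PySem.Set.update s ks = s := by
  induction ks generalizing s with
  | nil => rfl
  | cons k ks ih =>
    simp only [PySem.Set.update, List.foldl_cons]
    have hc : PySem.Set.add s k = s := by
      have := h k (by simp)
      simp [PySem.Set.add, this]
    rw [hc]
    exact ih s (fun x hx => h x (by simp [hx]))

-- the rewrite-each-key-once loop: final lookup at g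
theorem sortloop_getD {κ ν : Type} [BEq κ] [LawfulBEq κ] [DecidableEq κ] (F : ν → ν) (dfl : ν)
    (ks : List κ) (d : PySem.Dict κ ν) (hnd : ks.Nodup) (g : κ) :
    (ks.foldl (fun d g => d.insert g (F (d.getD g dfl))) d).getD g dfl
    = if g ∈ ks then F (d.getD g dfl) else d.getD g dfl := by
  induction ks generalizing d with
  | nil => simp
  | cons k ks ih =>
    simp only [List.foldl_cons, List.mem_cons]
    rw [ih _ (List.Nodup.of_cons hnd)]
    by_cases hg : g ∈ ks
    · have : g ≠ k := by rintro rfl; exact (List.nodup_cons.mp hnd).1 hg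
      simp [hg, this, PySem.Dict.getD_insert]
    · by_cases he : g = k
      · subst he
        simp [hg]
      · simp [hg, he, PySem.Dict.getD_insert]

-- ===== VERDICT (by name: the statement is the Claim_ definition above) =====
theorem reduce_fucked_spec : Claim_equal_reduce_fucked := by
  intro fucked _
  unfold Spec_reduce_fucked
  simp only [reduce_fucked, reduce_fucked_alt]
  rw [foldA_eq]
  simp only [Bool.true_and]
  set mid := fucked.foldl (fun d t => d.insert (t.1, t.2.1) (d.getD (t.1, t.2.1) 0 + t.2.2))
      PySem.Dict.empty with hmid
  have hkeys : mid.keys = PySem.Set.ofList (fucked.map (fun t => (t.1, t.2.1))) := by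
    rw [hmid, PySem.Dict.keys_foldl_insert_key fucked (fun t => (t.1, t.2.1))
      (fun d t => d.getD (t.1, t.2.1) 0 + t.2.2) PySem.Dict.empty]
    rfl
  cases hall : fucked.all (fun t => t.1 == none) with
  | true =>
    have hnone : ∀ p ∈ mid.items, p.1.1 = none := by
      intro p hp
      have hk := PySem.Dict.mem_keys_of_mem_items mid hp
      rw [hkeys, PySem.Set.mem_ofList] at hk
      obtain ⟨t, ht, hte⟩ := List.mem_map.mp hk
      have := List.all_eq_true.mp hall t ht
      simp only [beq_iff_eq] at this
      rw [← hte, this]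
    simp only [if_pos]
    by_cases hit : mid.items = []
    · simp [hit, PySem.List.sorted]
    · have hded : PySem.List.dedup (mid.items.map (fun p => p.1.1)) = [none] := by
        apply dedup_const
        · intro x hx
          obtain ⟨p, hp, hpe⟩ := List.mem_map.mp hx
          rw [← hpe]; exact hnone p hp
        · exact fun h => hit (List.map_eq_nil_iff.mp h)
      rw [hded]
      have hfil : mid.items.filter (fun p => p.1.1 == (none : Option Int)) = mid.items := by
        apply List.filter_eq_self.mpr
        intro p hp
        simp [hnone p hp]
      simp only [List.flatMap_cons, List.flatMap_nil, List.append_nil, hfil]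
      rw [sorted_rev_map (fun p : (Option Int × Int) × Int => (p.1.1, p.1.2, p.2)) (fun x => x.2.2)]
      rw [sorted_rev_map (fun p : (Option Int × Int) × Int => (p.1.2, p.2)) (fun ul => ul.2)]
      rw [List.map_map]
      apply List.map_congr_left
      intro p hp
      have hpm : p ∈ mid.items := (PySem.List.mem_sorted _ _ _ _).mp hp
      simp [hnone p hpm]
  | false =>
    simp only [Bool.false_eq_true, if_false]
    simp only [modify_of_insert_if_absent]
    set mid2 := mid.items.foldl
      (fun (d : PySem.Dict (Option Int) (List (Int × Int))) p =>
        d.modify p.1.1 [] (fun l => l ++ [(p.1.2, p.2)])) PySem.Dict.empty with hmid2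
    have hm2keys : mid2.keys = PySem.List.dedup (mid.items.map (fun p => p.1.1)) := by
      rw [hmid2, PySem.Dict.keys_foldl_modify_key mid.items (fun p => p.1.1) []
        (fun d p => fun l => l ++ [(p.1.2, p.2)]) PySem.Dict.empty]
      rfl
    have hm2nodup : mid2.keys.Nodup := by
      rw [hmid2]
      exact PySem.Dict.nodup_keys_foldl_modify_key mid.items (fun p => p.1.1) []
        (fun d p => fun l => l ++ [(p.1.2, p.2)]) PySem.Dict.empty PySem.Dict.nodup_keys_empty
    have hm2getD : ∀ g : Option Int, mid2.getD g []
        = (mid.items.filter (fun p => p.1.1 == g)).map (fun p => (p.1.2, p.2)) := by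
      intro g
      have hmm : mid2 = (mid.items.map (fun p => (p.1.1, (p.1.2, p.2)))).foldl
          (fun (d : PySem.Dict (Option Int) (List (Int × Int))) q =>
            d.modify q.1 [] (fun l => l ++ [q.2])) PySem.Dict.empty := by
        rw [hmid2, List.foldl_map]
      rw [hmm, PySem.Dict.getD_foldl_modify_append, List.filter_map, List.map_map]
      simp [PySem.Dict.getD_empty]
      rfl
    set mid2s := mid2.keys.foldl
      (fun (d : PySem.Dict (Option Int) (List (Int × Int))) g =>
        d.insert g (PySem.List.sorted (d.getD g []) (fun x => x.2) true)) mid2 with hmid2s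
    have hskeys : mid2s.keys = mid2.keys := by
      rw [hmid2s, PySem.Dict.keys_foldl_insert_key mid2.keys (fun g => g)
        (fun d g => PySem.List.sorted (d.getD g []) (fun x => x.2) true) mid2]
      exact set_update_of_subset _ _ (fun k hk => by simpa using hk)
    have hsnodup : mid2s.keys.Nodup := hskeys ▸ hm2nodup
    have hsgetD : ∀ g ∈ mid2.keys, mid2s.getD g []
        = PySem.List.sorted (mid2.getD g []) (fun x => x.2) true := by
      intro g hg
      rw [hmid2s, sortloop_getD (fun l => PySem.List.sorted l (fun x => x.2) true) []
        mid2.keys mid2 hm2nodup g]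
      simp [hg]
    rw [PySem.Dict.items_eq_map_keys mid2s hsnodup [], hskeys, List.flatMap_map, hm2keys]
    apply List.flatMap_congr
    intro g hg
    have hgk : g ∈ mid2.keys := hm2keys ▸ hg
    rw [hsgetD g hgk, hm2getD g]
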